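-- pv_equiv track=rewrite | github.com/g-dolphin/WorldCarbonPricingDatabase | _code/_sources_extraction/bootstrap_sources_from_disk.py | _build_id_counters
-- ===== SOURCE A (Python) =====
-- from collections import defaultdict
--
-- def _build_id_counters(existing_ids: set[str]) -> dict[tuple[str, str], int]:
--     counters: dict[tuple[str, str], int] = defaultdict(int)
--     for sid in existing_ids:
--         parts = sid.split("-")
--         if len(parts) < 3:
--             continue
--         prefix = "-".join(parts[:-2])
--         token = parts[-2]
--         tail = parts[-1]
--         if tail.isdigit():
--             counters[(prefix, token)] = max(counters[(prefix, token)], int(tail))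
--     return counters
-- ===== SOURCE B (Python) =====
-- def _parse(sid):
--     parts = sid.split("-")
--     if len(parts) >= 3 and parts[-1].isdigit():
--         return ("-".join(parts[:-2]), parts[-2]), int(parts[-1])
--     return None
--
--
-- def _build_id_counters(existing_ids: set[str]) -> dict[tuple[str, str], int]:
--     # Phase 1: parse once into a flat (key, n) list.
--     parsed = [hit for hit in map(_parse, existing_ids) if hit is not None]
--     # Phase 2: distinct keys in first-occurrence order.
--     keys = []
--     for key, _ in parsed:
--         if key not in keys:
--             keys.append(key)
--     # Phase 3: per key, a fresh scan of the parsed list computes its max.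
--     return {key: max(n for k, n in parsed if k == key) for key in keys}
-- ===== Notes on version B (the rewrite author's own statement) =====
-- stated objective: alternative
-- what changed: Replaces A's single-pass hash-accumulated running max with a three-phase scheme with no accumulator dict: parse all ids into a flat (key, n) list, collect distinct keys in first-occurrence order, then compute each key's max by a separate scan of the parsed list (nested scans instead of an online dict update).
import Mathlib
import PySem

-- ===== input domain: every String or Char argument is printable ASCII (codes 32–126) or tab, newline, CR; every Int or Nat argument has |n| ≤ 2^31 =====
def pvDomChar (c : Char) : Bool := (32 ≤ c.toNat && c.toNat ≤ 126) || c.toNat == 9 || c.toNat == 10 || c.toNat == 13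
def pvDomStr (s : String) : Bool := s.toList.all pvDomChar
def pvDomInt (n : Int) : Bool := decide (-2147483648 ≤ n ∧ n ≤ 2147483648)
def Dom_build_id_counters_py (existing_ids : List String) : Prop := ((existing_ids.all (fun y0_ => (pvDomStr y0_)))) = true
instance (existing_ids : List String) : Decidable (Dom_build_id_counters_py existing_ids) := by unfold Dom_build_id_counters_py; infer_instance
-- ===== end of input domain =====

-- B replaces A's single-pass hash-accumulated running max by a three-phase scheme with no
-- accumulator dict: parse all ids into a flat (key, n) list, collect the distinct keys in
-- first-occurrence order, then compute each key's max by a separate scan of that list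
-- (nested scans; same result, different algorithm). The Python A iterates a set; here the
-- set is its list of distinct elements.

-- ===== PORT A =====
def build_id_counters_py (existing_ids : List String) : List (String × String × Int) :=
  (existing_ids.foldl
    (fun (counters : PySem.Dict (String × String) Int) sid =>
      let parts := (PySem.Str.split? sid "-").getD []   -- sep "-" ≠ "": split? is always some
      if parts.length < 3 then counters
      else
        let pfx := PySem.Str.join "-" (PySem.List.slice parts none (some (-2)))
        let token := (PySem.List.pyGet? parts (-2)).getD ""   -- in range: parts.length ≥ 3
        let tail := (PySem.List.pyGet? parts (-1)).getD ""
        if PySem.Str.strIsdigit tail then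
          -- int(tail) never raises on a digit tail, so the .getD 0 default is unreachable
          counters.insert (pfx, token)
            (max (counters.getD (pfx, token) 0) ((PySem.Int.ofStr? tail).getD 0))
        else counters)
    PySem.Dict.empty).items.map (fun p => (p.1.1, p.1.2, p.2))

-- ===== PORT B =====
def pvParse (sid : String) : Option ((String × String) × Int) :=
  let parts := (PySem.Str.split? sid "-").getD []   -- sep "-" ≠ "": split? is always some
  if 3 ≤ parts.length ∧ PySem.Str.strIsdigit ((PySem.List.pyGet? parts (-1)).getD "") = true then
    some ((PySem.Str.join "-" (PySem.List.slice parts none (some (-2))),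
           (PySem.List.pyGet? parts (-2)).getD ""),
          (PySem.Int.ofStr? ((PySem.List.pyGet? parts (-1)).getD "")).getD 0)
  else none

def build_id_counters_py_alt (existing_ids : List String) : List (String × String × Int) :=
  -- phase 1: parsed = [hit for hit in map(_parse, existing_ids) if hit is not None]
  let parsed := (existing_ids.map pvParse).filterMap id
  -- phase 2: distinct keys in first-occurrence order
  let keys := parsed.foldl
    (fun (ks : List (String × String)) p => if p.1 ∈ ks then ks else ks ++ [p.1]) []
  -- phase 3: {key: max(n for k, n in parsed if k == key) for key in keys}
  keys.map (fun k =>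
    (k.1, k.2,
     (PySem.List.max? ((parsed.filter (fun p => p.1 == k)).map Prod.snd) (fun x => x)).getD 0))

-- ===== PRECONDITION & SPEC =====
def Spec_build_id_counters_py (existing_ids : List String) (out : List (String × String × Int)) : Prop := out = build_id_counters_py_alt existing_ids
instance (existing_ids : List String) (out : List (String × String × Int)) : Decidable (Spec_build_id_counters_py existing_ids out) := by unfold Spec_build_id_counters_py; infer_instance

-- ===== CLAIM (what is proved, stated in full; the proofs are below) =====
def Claim_equal_build_id_counters_py : Prop := ∀ (existing_ids : List String), Dom_build_id_counters_py existing_ids → Spec_build_id_counters_py existing_ids (build_id_counters_py existing_ids)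

-- ===== LEMMAS AND PROOFS =====

-- A's loop body as a named function (zeta-reduced; definitionally A's lambda)
def pvStepA (counters : PySem.Dict (String × String) Int) (sid : String) :
    PySem.Dict (String × String) Int :=
  if ((PySem.Str.split? sid "-").getD []).length < 3 then counters
  else if PySem.Str.strIsdigit
      ((PySem.List.pyGet? ((PySem.Str.split? sid "-").getD []) (-1)).getD "") then
    counters.insert
      (PySem.Str.join "-" (PySem.List.slice ((PySem.Str.split? sid "-").getD []) none (some (-2))),
       (PySem.List.pyGet? ((PySem.Str.split? sid "-").getD []) (-2)).getD "")
      (max (counters.getD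
        (PySem.Str.join "-" (PySem.List.slice ((PySem.Str.split? sid "-").getD []) none (some (-2))),
         (PySem.List.pyGet? ((PySem.Str.split? sid "-").getD []) (-2)).getD "") 0)
        ((PySem.Int.ofStr? ((PySem.List.pyGet? ((PySem.Str.split? sid "-").getD []) (-1)).getD "")).getD 0))
  else counters

-- B's key list and per-key maximum, named for the proofs
def pvKeys (ps : List ((String × String) × Int)) : List (String × String) :=
  ps.foldl (fun ks p => if p.1 ∈ ks then ks else ks ++ [p.1]) []

def pvMaxOver (ps : List ((String × String) × Int)) (k : String × String) : Int :=
  ((ps.filter (fun p => p.1 == k)).map Prod.snd).foldl max 0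

-- A's step, rewritten through the shared parser
theorem pv_stepA_eq (d : PySem.Dict (String × String) Int) (sid : String) :
    pvStepA d sid = (match pvParse sid with
      | some (k, n) => d.insert k (max (d.getD k 0) n)
      | none => d) := by
  unfold pvStepA pvParse
  simp only []
  by_cases h3 : ((PySem.Str.split? sid "-").getD []).length < 3
  · rw [if_pos h3, if_neg (by rintro ⟨hc, -⟩; omega)]
  · rw [if_neg h3]
    by_cases hd : PySem.Str.strIsdigit
        ((PySem.List.pyGet? ((PySem.Str.split? sid "-").getD []) (-1)).getD "") = true
    · rw [if_pos hd, if_pos ⟨by omega, hd⟩]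
    · rw [if_neg hd, if_neg (by rintro ⟨-, hc⟩; exact hd hc)]

-- an option of casted naturals is nonneg (shape of ofChars?'s '+'/plain branches)
theorem pv_shape_nonneg (o : Option Nat) :
    0 ≤ (Option.map (fun n : Int => n) (o.bind fun a => some ((a : Int)))).getD 0 := by
  cases o <;> simp

theorem pv_ofChars_digits_nonneg (cs : List Char)
    (h : ∀ c ∈ cs, PySem.Chars.isdigit c = true) :
    0 ≤ (PySem.Int.ofChars? cs).getD 0 := by
  have hS : ∀ c ∈ (List.dropWhile PySem.Int.isIntSpace
      (List.dropWhile PySem.Int.isIntSpace cs).reverse).reverse,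
      PySem.Chars.isdigit c = true := by
    intro c hc
    exact h c ((List.dropWhile_sublist _).mem
      (List.mem_reverse.mp ((List.dropWhile_sublist _).mem (List.mem_reverse.mp hc))))
  unfold PySem.Int.ofChars?
  simp only []
  split
  · rename_i heq
    exfalso
    have : PySem.Chars.isdigit '-' = true := hS '-' (by rw [heq]; exact List.mem_cons_self)
    simp [PySem.Chars.isdigit] at this
  · exact pv_shape_nonneg _
  · exact pv_shape_nonneg _

theorem pvParse_nonneg (sid : String) (k : String × String) (n : Int)
    (h : pvParse sid = some (k, n)) : 0 ≤ n := by
  unfold pvParse at h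
  simp only [] at h
  split at h
  · rename_i hc
    have hn : n = (PySem.Int.ofStr?
        ((PySem.List.pyGet? ((PySem.Str.split? sid "-").getD []) (-1)).getD "")).getD 0 :=
      (congrArg Prod.snd (Option.some.inj h)).symm
    have hall : ∀ c ∈ ((PySem.List.pyGet? ((PySem.Str.split? sid "-").getD []) (-1)).getD "").toList,
        PySem.Chars.isdigit c = true := by
      have hd := hc.2
      rw [PySem.Str.strIsdigit_eq] at hd
      simp [PySem.Chars.strIsdigit, List.all_eq_true] at hd
      exact hd.2
    rw [hn, PySem.Int.ofStr?]
    exact pv_ofChars_digits_nonneg _ hall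
  · exact absurd h (by simp)

-- membership in pvKeys is membership among the parsed keys
theorem pv_mem_keys_aux (ps : List ((String × String) × Int)) (init : List (String × String))
    (k : String × String) :
    (k ∈ ps.foldl (fun ks p => if p.1 ∈ ks then ks else ks ++ [p.1]) init)
      ↔ k ∈ init ∨ k ∈ ps.map Prod.fst := by
  induction ps generalizing init with
  | nil => simp
  | cons p t ih =>
    rw [List.foldl_cons, ih]
    by_cases hp : p.1 ∈ init
    · simp only [if_pos hp, List.map_cons, List.mem_cons]
      constructor
      · rintro (h | h) <;> tauto
      · rintro (h | rfl | h) <;> tauto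
    · simp only [if_neg hp, List.map_cons, List.mem_cons, List.mem_append]
      tauto

theorem pv_mem_keys (ps : List ((String × String) × Int)) (k : String × String) :
    k ∈ pvKeys ps ↔ k ∈ ps.map Prod.fst := by
  rw [pvKeys, pv_mem_keys_aux]; simp

-- snoc laws for pvKeys and pvMaxOver
theorem pvKeys_snoc (ps : List ((String × String) × Int)) (p : (String × String) × Int) :
    pvKeys (ps ++ [p]) = if p.1 ∈ pvKeys ps then pvKeys ps else pvKeys ps ++ [p.1] := by
  rw [pvKeys, List.foldl_append]; rfl

theorem pvMaxOver_snoc (ps : List ((String × String) × Int)) (k n) (k' : String × String) :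
    pvMaxOver (ps ++ [(k, n)]) k'
      = if k' = k then max (pvMaxOver ps k') n else pvMaxOver ps k' := by
  unfold pvMaxOver
  rw [List.filter_append]
  by_cases hk : k' = k
  · subst hk
    simp [List.foldl_append]
  · have : ((k, n).1 == k') = false := by simpa using fun h => hk h.symm
    simp [List.filter, this, hk]

-- find? on a keyed map over a key list
theorem pv_find_keyed (keys : List (String × String)) (f : String × String → Int)
    (k : String × String) :
    ((keys.map (fun k' => (k', f k'))).find? (fun p => p.1 == k))
      = if k ∈ keys then some (k, f k) else none := by
  induction keys with
  | nil => simp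
  | cons x t ih =>
    by_cases hx : x = k
    · subst hx; simp
    · have hb : (x == k) = false := by simpa using hx
      rw [List.map_cons, List.find?_cons_of_neg (by simp [hb]), ih]
      by_cases hk : k ∈ t <;> simp [hk, Ne.symm hx]

-- lookups on a dict whose items are a keyed map
theorem pv_getD_of_items (d : PySem.Dict (String × String) Int)
    (keys : List (String × String)) (f : String × String → Int)
    (h : d.items = keys.map (fun k' => (k', f k'))) (k : String × String) :
    d.getD k 0 = if k ∈ keys then f k else 0 := by
  have : d.get? k = (if k ∈ keys then some (k, f k) else none).map Prod.snd := by
    show (d.items.find? (fun p => p.1 == k)).map Prod.snd = _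
    rw [h, pv_find_keyed]
  rw [PySem.Dict.getD_eq_get?_getD, this]
  by_cases hk : k ∈ keys <;> simp [hk]

theorem pv_contains_of_items (d : PySem.Dict (String × String) Int)
    (keys : List (String × String)) (f : String × String → Int)
    (h : d.items = keys.map (fun k' => (k', f k'))) (k : String × String) :
    d.contains k = decide (k ∈ keys) := by
  show d.items.any (fun p => p.1 == k) = _
  rw [h, List.any_map]
  by_cases hk : k ∈ keys
  · simp only [hk, decide_true, List.any_eq_true]
    exact ⟨k, hk, by simp⟩
  · simp only [hk, decide_false, List.any_eq_false]
    intro x hx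
    have hne : x ≠ k := fun he => hk (he ▸ hx)
    simpa using hne

-- the invariant: A's fold produces exactly B's keyed map of maxima
theorem pv_main (ids : List String) :
    (ids.foldl pvStepA PySem.Dict.empty).items
      = (pvKeys (ids.filterMap pvParse)).map
          (fun k => (k, pvMaxOver (ids.filterMap pvParse) k)) := by
  induction ids using List.reverseRecOn with
  | nil => rfl
  | append_singleton t x ih =>
    rw [List.foldl_append, List.foldl_cons, List.foldl_nil, pv_stepA_eq, List.filterMap_append]
    cases hp : pvParse x with
    | none => simpa [hp] using ih
    | some q =>
      obtain ⟨k, n⟩ := q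
      simp only [hp, List.filterMap_cons, List.filterMap_nil]
      set ps := t.filterMap pvParse with hps
      set d := t.foldl pvStepA PySem.Dict.empty with hd
      have hgetD := pv_getD_of_items d (pvKeys ps) (fun k' => pvMaxOver ps k') ih
      have hcont := pv_contains_of_items d (pvKeys ps) (fun k' => pvMaxOver ps k') ih
      rw [PySem.Dict.items_insert, hcont k]
      by_cases hk : k ∈ pvKeys ps
      · rw [if_pos (by simp [hk]), ih, List.map_map, pvKeys_snoc, if_pos hk]
        apply List.map_congr_left
        intro k' hk'
        by_cases he : k' = k
        · subst he
          simp [hgetD, hk, pvMaxOver_snoc]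
        · have hb : (k' == k) = false := by simpa using he
          simp [pvMaxOver_snoc, he]
      · rw [if_neg (by simp [hk]), ih, pvKeys_snoc, if_neg hk, List.map_append]
        have h0 : pvMaxOver ps k = 0 := by
          have : ps.filter (fun p => p.1 == k) = [] := by
            rw [List.filter_eq_nil_iff]
            intro p hpm hpk
            exact hk ((pv_mem_keys ps k).mpr
              (by simpa [eq_of_beq hpk] using List.mem_map_of_mem (f := Prod.fst) hpm))
          rw [pvMaxOver, this]; rfl
        congr 1
        · apply List.map_congr_left
          intro k' hk'
          have : k' ≠ k := fun he => hk (he ▸ hk')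
          simp [pvMaxOver_snoc, this]
        · simp [hgetD, hk, pvMaxOver_snoc, h0]

-- max(vals) over a nonempty list of nonnegatives is the 0-seeded running max
theorem pv_max_eq_foldl (vs : List Int) (hne : vs ≠ []) (hpos : ∀ x ∈ vs, 0 ≤ x) :
    (PySem.List.max? vs (fun x => x)).getD 0 = vs.foldl max 0 := by
  cases vs with
  | nil => exact absurd rfl hne
  | cons x t =>
    rw [PySem.List.max?_id_cons]
    have hx : max 0 x = x := max_eq_right (hpos x (by simp))
    simp [hx]

-- ===== VERDICT (by name: the statement is the Claim_ definition above) =====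
theorem build_id_counters_py_spec : Claim_equal_build_id_counters_py := by
  intro ids _
  unfold Spec_build_id_counters_py build_id_counters_py build_id_counters_py_alt
  simp only []
  have hA : ids.foldl
      (fun (counters : PySem.Dict (String × String) Int) sid =>
        let parts := (PySem.Str.split? sid "-").getD []
        if parts.length < 3 then counters
        else
          let pfx := PySem.Str.join "-" (PySem.List.slice parts none (some (-2)))
          let token := (PySem.List.pyGet? parts (-2)).getD ""
          let tail := (PySem.List.pyGet? parts (-1)).getD ""
          if PySem.Str.strIsdigit tail then
            counters.insert (pfx, token)
              (max (counters.getD (pfx, token) 0) ((PySem.Int.ofStr? tail).getD 0))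
          else counters)
      PySem.Dict.empty = ids.foldl pvStepA PySem.Dict.empty := rfl
  have hmap : (ids.map pvParse).filterMap id = ids.filterMap pvParse := by
    rw [List.filterMap_map]; rfl
  rw [hA, pv_main, List.map_map, hmap]
  show _ = (pvKeys (ids.filterMap pvParse)).map _
  apply List.map_congr_left
  intro k hk
  set ps := ids.filterMap pvParse with hps
  have hne : (ps.filter (fun p => p.1 == k)).map Prod.snd ≠ [] := by
    obtain ⟨p, hpm, hpk⟩ := List.exists_of_mem_map ((pv_mem_keys ps k).mp hk)
    have : p ∈ ps.filter (fun p => p.1 == k) :=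
      List.mem_filter.mpr ⟨hpm, by simp [hpk]⟩
    exact List.ne_nil_of_mem (List.mem_map_of_mem (f := Prod.snd) this)
  have hpos : ∀ x ∈ (ps.filter (fun p => p.1 == k)).map Prod.snd, 0 ≤ x := by
    intro x hx
    obtain ⟨p, hpm, hpx⟩ := List.exists_of_mem_map hx
    obtain ⟨sid, -, hsid⟩ := List.mem_filterMap.mp (List.mem_filter.mp hpm).1
    exact hpx ▸ pvParse_nonneg sid p.1 p.2 (by simpa using hsid)
  simp only [Function.comp_def]
  rw [pv_max_eq_foldl _ hne hpos]
  rfl
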